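-- pv_equiv track=rewrite | github.com/adhithpranav/lidar-rfid-actuator-system | code/experimental/multi_direction_logic.py | choose_lanes_dynamic
-- ===== SOURCE A (Python) =====
-- from collections import defaultdict, deque
--
-- def choose_lanes_dynamic(lanes, speeds, arrival_times):
--     # Create a dictionary to store lanes with vehicle info (arrival time and speed)
--     lane_queues = defaultdict(deque)
--
--     for lane, speed, arrival in zip(lanes, speeds, arrival_times):
--         lane_queues[lane].append((arrival, speed))
--
--     # Sort each lane's vehicles by arrival time
--     for lane in lane_queues:
--         lane_queues[lane] = deque(sorted(lane_queues[lane], key=lambda x: x[0]))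
--
--     # Prepare to process vehicles
--     processed_order = []
--
--     while any(lane_queues.values()):  # While there are vehicles in any lane
--         earliest_vehicle = None
--         selected_lane = None
--
--         # Find the earliest vehicle across all lanes
--         for lane, queue in lane_queues.items():
--             if queue:
--                 if earliest_vehicle is None or queue[0][0] < earliest_vehicle[0]:
--                     earliest_vehicle = queue[0]
--                     selected_lane = lane
--
--         # Process the vehicle with the earliest arrival time
--         if selected_lane is not None:
--             lane_queues[selected_lane].popleft()  # Remove the processed vehicle
--             processed_order.append(selected_lane)  # Log the lane used
--
--     # Generate the lane picking order as a string
--     lane_order = " -> ".join(map(str, processed_order))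
--     return lane_order
-- ===== SOURCE B (Python) =====
-- def choose_lanes_dynamic(lanes, speeds, arrival_times):
--     # Decorate each vehicle with (arrival, first-occurrence index of its lane,
--     # input position) and do ONE stable sort; ties never reach the lane string
--     # because the input position is unique.
--     first = {}
--     rows = []
--     for i, (lane, speed, arrival) in enumerate(zip(lanes, speeds, arrival_times)):
--         if lane not in first:
--             first[lane] = len(first)
--         rows.append((arrival, first[lane], i, lane))
--     rows.sort()
--     return " -> ".join(r[3] for r in rows)
-- ===== Notes on version B (the rewrite author's own statement) =====
-- stated objective: faster
-- what changed: Instead of A's round-based selection that rescans every lane queue to find the earliest head vehicle once per vehicle, B decorates each vehicle with (arrival, first-occurrence rank of its lane, input position) and performs a single stable sort, reading the lane order off the sorted list.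
import Mathlib
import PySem

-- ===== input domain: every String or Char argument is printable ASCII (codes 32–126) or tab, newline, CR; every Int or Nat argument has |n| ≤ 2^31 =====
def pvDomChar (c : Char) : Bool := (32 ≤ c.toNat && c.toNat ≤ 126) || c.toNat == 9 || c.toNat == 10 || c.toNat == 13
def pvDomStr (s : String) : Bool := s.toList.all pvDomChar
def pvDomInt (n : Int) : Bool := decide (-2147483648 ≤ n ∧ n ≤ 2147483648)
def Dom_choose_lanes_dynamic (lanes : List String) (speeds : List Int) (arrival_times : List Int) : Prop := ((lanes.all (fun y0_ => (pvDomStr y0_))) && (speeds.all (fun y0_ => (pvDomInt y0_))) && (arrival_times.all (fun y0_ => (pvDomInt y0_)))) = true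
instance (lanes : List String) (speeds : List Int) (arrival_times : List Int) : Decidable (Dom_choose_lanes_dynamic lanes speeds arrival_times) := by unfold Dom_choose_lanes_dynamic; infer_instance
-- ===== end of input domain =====

-- B replaces A's per-vehicle rescan of every lane queue by one stable sort of the vehicles
-- keyed by (arrival, lane first-occurrence rank, input position) — measurably faster.
-- ===== PORT A =====
-- A-side helpers (literal transliteration of Source A)
def pvTripsA (lanes : List String) (speeds : List Int) (arrival_times : List Int) : List (String × Int × Int) :=
  lanes.zip (speeds.zip arrival_times)

-- 'for lane, speed, arrival in zip(...): lane_queues[lane].append((arrival, speed))'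
def pvBuildA (trips : List (String × Int × Int)) : PySem.Dict String (List (Int × Int)) :=
  trips.foldl (fun d t => d.modify t.1 [] (fun q => q ++ [(t.2.2, t.2.1)])) PySem.Dict.empty

-- 'for lane in lane_queues: lane_queues[lane] = deque(sorted(lane_queues[lane], key=lambda x: x[0]))'
def pvSortQA (d : PySem.Dict String (List (Int × Int))) : PySem.Dict String (List (Int × Int)) :=
  d.keys.foldl (fun d' k => d'.insert k (PySem.List.sorted (d'.getD k []) (fun v => v.1) false)) d

-- the inner 'for lane, queue in lane_queues.items(): …' scan for the earliest head
def pvScanA (items : List (String × List (Int × Int))) : Option (Int × Int) × Option String :=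
  items.foldl (fun st p =>
    match p.2 with
    | [] => st
    | v :: _ =>
      match st.1 with
      | none => (some v, some p.1)
      | some ev => if v.1 < ev.1 then (some v, some p.1) else st) (none, none)

-- 'while any(lane_queues.values()): …'; fuel = total number of stored vehicles makes the loop total
def pvExtractA : Nat → PySem.Dict String (List (Int × Int)) → List String → List String
  | 0, _, acc => acc
  | fuel+1, d, acc =>
    if d.values.any (fun q => decide (q ≠ [])) then
      match (pvScanA d.items).2 with
      | some lane => pvExtractA fuel (d.modify lane [] (fun q => q.drop 1)) (acc ++ [lane])
      | none => acc
    else acc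

def choose_lanes_dynamic (lanes : List String) (speeds : List Int) (arrival_times : List Int) : String :=
  let d := pvSortQA (pvBuildA (pvTripsA lanes speeds arrival_times))
  PySem.Str.join " -> " (pvExtractA ((d.values.map List.length).sum) d [])

-- ===== PORT B =====
-- B-side helpers (literal transliteration of Source B)
-- Python compares the row tuples lexicographically; the 4th component (the lane string) is
-- never reached because the 3rd (the input position) is distinct, so the key on the first
-- three components is exact.
def pvKeyB (r : Int × Int × Int × String) : Int ×ₗ Int ×ₗ Int := toLex (r.1, toLex (r.2.1, r.2.2.1))

-- the decorate loop: 'if lane not in first: first[lane] = len(first); rows.append(...)'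
def pvRowsB (trips : List (String × Int × Int)) : List (Int × Int × Int × String) :=
  ((PySem.List.enumerate trips).foldl
    (fun (st : PySem.Dict String Int × List (Int × Int × Int × String)) p =>
      let first := if st.1.contains p.2.1 then st.1 else st.1.insert p.2.1 (st.1.size : Int)
      (first, st.2 ++ [(p.2.2.2, first.getD p.2.1 0, p.1, p.2.1)]))
    (PySem.Dict.empty, [])).2

def choose_lanes_dynamic_alt (lanes : List String) (speeds : List Int) (arrival_times : List Int) : String :=
  PySem.Str.join " -> "
    ((PySem.List.sorted (pvRowsB (lanes.zip (speeds.zip arrival_times))) pvKeyB false).map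
      (fun r => r.2.2.2))

-- ===== PRECONDITION & SPEC =====
def Spec_choose_lanes_dynamic (lanes : List String) (speeds : List Int) (arrival_times : List Int) (out : String) : Prop := out = choose_lanes_dynamic_alt lanes speeds arrival_times
instance (lanes : List String) (speeds : List Int) (arrival_times : List Int) (out : String) : Decidable (Spec_choose_lanes_dynamic lanes speeds arrival_times out) := by unfold Spec_choose_lanes_dynamic; infer_instance

-- ===== CLAIM (what is proved, stated in full; the proofs are below) =====
def Claim_equal_choose_lanes_dynamic : Prop := ∀ (lanes : List String) (speeds : List Int) (arrival_times : List Int), Dom_choose_lanes_dynamic lanes speeds arrival_times → Spec_choose_lanes_dynamic lanes speeds arrival_times (choose_lanes_dynamic lanes speeds arrival_times)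


-- ===== LEMMAS AND PROOFS =====

-- row type used by the proofs: (arrival, lane rank, input index, lane)
abbrev pvR : Type := Int × Int × Int × String

-- the distinct lanes in first-occurrence order
def pvLanes (trips : List (String × Int × Int)) : List String :=
  PySem.Set.ofList (trips.map (fun t => t.1))

-- closed form of the decorated rows
def pvCanon (trips : List (String × Int × Int)) : List pvR :=
  (PySem.List.enumerate trips).map
    (fun p => (p.2.2.2, ((pvLanes trips).idxOf p.2.1 : Int), p.1, p.2.1))

-- A's queue of lane k after the per-lane sort
def pvQA (trips : List (String × Int × Int)) (k : String) : List (Int × Int) :=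
  PySem.List.sorted ((trips.filter (fun t => t.1 == k)).map (fun t => (t.2.2, t.2.1)))
    (fun v => v.1) false

-- ghost queue of lane k: the decorated rows of lane k, sorted by arrival (stable)
def pvQG (trips : List (String × Int × Int)) (k : String) : List pvR :=
  PySem.List.sorted ((pvCanon trips).filter (fun r => r.2.2.2 == k)) (fun r => r.1) false

def pvG0 (trips : List (String × Int × Int)) : List (String × List pvR) :=
  (pvLanes trips).map (fun k => (k, pvQG trips k))

-- ghost versions of A's scan and extraction loop, on a plain items list of tagged rows
def gScan (items : List (String × List pvR)) : Option pvR × Option String :=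
  items.foldl (fun st p =>
    match p.2 with
    | [] => st
    | v :: _ =>
      match st.1 with
      | none => (some v, some p.1)
      | some ev => if v.1 < ev.1 then (some v, some p.1) else st) (none, none)

def gExtract : Nat → List (String × List pvR) → List String → List String
  | 0, _, acc => acc
  | fuel+1, its, acc =>
    if its.any (fun p => decide (p.2 ≠ [])) then
      match (gScan its).2 with
      | some lane => gExtract fuel (its.map (fun p => if p.1 == lane then (p.1, p.2.drop 1) else p)) (acc ++ [lane])
      | none => acc
    else acc

def pvFlat (gs : List (String × List pvR)) : List pvR := gs.flatMap (fun p => p.2)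

-- relation between A's real queues and the ghost queues: same lane, same arrival sequence
def pvRel (p : String × List (Int × Int)) (g : String × List pvR) : Prop :=
  p.1 = g.1 ∧ p.2.map (fun v => v.1) = g.2.map (fun r => r.1)

-- lexicographic facts about the key
lemma pvKey_lt_iff (r s : pvR) : pvKeyB r < pvKeyB s ↔
    r.1 < s.1 ∨ (r.1 = s.1 ∧ (r.2.1 < s.2.1 ∨ (r.2.1 = s.2.1 ∧ r.2.2.1 < s.2.2.1))) := by
  simp [pvKeyB, Prod.Lex.lt_iff]

-- ---------- Section 1: closed form of B's rows ----------

lemma set_update_prefix {α : Type} [BEq α] (xs : List α) (s : PySem.Set α) :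
    ∃ ys, PySem.Set.update s xs = s ++ ys := by
  induction xs generalizing s with
  | nil => exact ⟨[], by simp [PySem.Set.update]⟩
  | cons x xs ih =>
    have hstep : PySem.Set.update s (x :: xs) = PySem.Set.update (PySem.Set.add s x) xs := rfl
    obtain ⟨ys', hys'⟩ := ih (PySem.Set.add s x)
    by_cases hc : PySem.Set.contains s x = true
    · exact ⟨ys', by rw [hstep, hys', PySem.Set.add, if_pos hc]⟩
    · refine ⟨x :: ys', ?_⟩
      rw [hstep, hys', PySem.Set.add, if_neg hc]
      simp
lemma idxOf_update_of_mem (L : List String) (xs : List String) {lane : String} (h : lane ∈ L) :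
    (PySem.Set.update L xs).idxOf lane = L.idxOf lane := by
  obtain ⟨ys, hys⟩ := set_update_prefix xs L
  rw [hys, List.idxOf_append_of_mem h]

lemma rowsB_fold (suf : List (String × Int × Int)) (s : Int) (d : PySem.Dict String Int)
    (acc : List pvR) (L : List String) (hk : d.keys = L) (hnd : L.Nodup)
    (hget : ∀ lane ∈ L, d.getD lane 0 = (L.idxOf lane : Int)) :
    ((PySem.List.enumerate suf s).foldl
      (fun (st : PySem.Dict String Int × List (Int × Int × Int × String)) p =>
        let first := if st.1.contains p.2.1 then st.1 else st.1.insert p.2.1 (st.1.size : Int)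
        (first, st.2 ++ [(p.2.2.2, first.getD p.2.1 0, p.1, p.2.1)]))
      (d, acc)).2
    = acc ++ (PySem.List.enumerate suf s).map
        (fun p => (p.2.2.2, (((PySem.Set.update L (suf.map (fun t => t.1))).idxOf p.2.1 : Nat) : Int), p.1, p.2.1)) := by
  induction suf generalizing s d acc L with
  | nil => simp [PySem.List.enumerate_nil]
  | cons t suf ih =>
    rw [PySem.List.enumerate_cons, List.foldl_cons, List.map_cons]
    have hupd : PySem.Set.update L ((t :: suf).map (fun t => t.1))
        = PySem.Set.update (PySem.Set.add L t.1) (suf.map (fun t => t.1)) := rfl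
    by_cases hc : d.contains t.1 = true
    · have hmem : t.1 ∈ L := hk ▸ (PySem.Dict.contains_iff_mem_keys d t.1).1 hc
      have hadd : PySem.Set.add L t.1 = L := by
        rw [PySem.Set.add, if_pos (by simp [PySem.Set.contains, hmem])]
      simp only [hc, if_true]
      rw [ih (s+1) d _ L hk hnd hget, hupd, hadd]
      rw [hget t.1 hmem, idxOf_update_of_mem L _ hmem]
      simp
    · have hnmem : t.1 ∉ L := fun hm =>
        hc ((PySem.Dict.contains_iff_mem_keys d t.1).2 (hk ▸ hm))
      have hcf : d.contains t.1 = false := by simpa using hc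
      simp only [hcf, Bool.false_eq_true, if_false]
      have hsz : d.size = L.length := by
        rw [PySem.Dict.size, ← hk, PySem.Dict.keys, List.length_map]
      have hk' : (d.insert t.1 (d.size : Int)).keys = L ++ [t.1] := by
        rw [PySem.Dict.keys_insert_of_not_contains d _ (by simpa using hc), hk]
      have hnd' : (L ++ [t.1]).Nodup := by
        simp only [List.nodup_append, List.nodup_singleton]
        exact ⟨hnd, trivial, fun a ha b hb he => hnmem ((he.trans (List.mem_singleton.1 hb)) ▸ ha)⟩
      have hget' : ∀ lane ∈ L ++ [t.1],
          (d.insert t.1 (d.size : Int)).getD lane 0 = ((L ++ [t.1]).idxOf lane : Int) := by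
        intro lane hlane
        rcases List.mem_append.1 hlane with hl | hl
        · have hne : lane ≠ t.1 := fun he => hnmem (he ▸ hl)
          rw [PySem.Dict.getD_insert_of_ne d _ _ hne, hget lane hl,
            List.idxOf_append_of_mem hl]
        · have : lane = t.1 := by simpa using hl
          subst this
          rw [PySem.Dict.getD_insert_self, hsz, List.idxOf_append, if_neg hnmem]
          simp
      have hadd : PySem.Set.add L t.1 = L ++ [t.1] := by
        rw [PySem.Set.add, if_neg (by simp [PySem.Set.contains, hnmem])]
      rw [ih (s+1) _ _ (L ++ [t.1]) hk' hnd' hget', hupd, hadd]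
      rw [hget' t.1 (by simp), idxOf_update_of_mem (L ++ [t.1]) _ (by simp)]
      simp

lemma rowsB_eq (trips : List (String × Int × Int)) : pvRowsB trips = pvCanon trips := by
  have h := rowsB_fold trips 0 PySem.Dict.empty [] [] (by rfl) (by simp)
    (by intro lane h; simp at h)
  rw [pvRowsB, h]
  rw [pvCanon, pvLanes]
  rfl

-- ---------- Section 2: closed form of A's dict ----------

lemma buildA_eq (trips : List (String × Int × Int)) :
    pvBuildA trips = (trips.map (fun t => (t.1, (t.2.2, t.2.1)))).foldl
      (fun d p => d.modify p.1 [] (fun q => q ++ [p.2])) PySem.Dict.empty := by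
  rw [List.foldl_map]
  rfl

lemma keys_buildA (trips : List (String × Int × Int)) :
    (pvBuildA trips).keys = pvLanes trips := by
  rw [pvBuildA]
  rw [PySem.Dict.keys_foldl_modify_key trips (fun t => t.1) []
    (fun _ t => fun q => q ++ [(t.2.2, t.2.1)]) PySem.Dict.empty]
  rfl

lemma getD_buildA (trips : List (String × Int × Int)) (c : String) :
    (pvBuildA trips).getD c [] =
      (trips.filter (fun t => t.1 == c)).map (fun t => (t.2.2, t.2.1)) := by
  rw [buildA_eq, PySem.Dict.getD_foldl_modify_append]
  rw [List.filter_map, List.map_map]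
  rfl

lemma sortQA_fold (ks : List String) (d : PySem.Dict String (List (Int × Int)))
    (hnd : ks.Nodup) (hsub : ∀ k ∈ ks, d.contains k = true) :
    (ks.foldl (fun d' k => d'.insert k (PySem.List.sorted (d'.getD k []) (fun v => v.1) false)) d).keys
        = d.keys ∧
    ∀ c, (ks.foldl (fun d' k => d'.insert k (PySem.List.sorted (d'.getD k []) (fun v => v.1) false)) d).getD c []
        = if c ∈ ks then PySem.List.sorted (d.getD c []) (fun v => v.1) false else d.getD c [] := by
  induction ks generalizing d with
  | nil => exact ⟨rfl, fun c => by simp⟩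
  | cons k ks ih =>
    have hck : d.contains k = true := hsub k List.mem_cons_self
    set d2 := d.insert k (PySem.List.sorted (d.getD k []) (fun v => v.1) false) with hd2
    have hkeys2 : d2.keys = d.keys := PySem.Dict.keys_insert_of_contains d _ hck
    have hsub2 : ∀ j ∈ ks, d2.contains j = true := by
      intro j hj
      rw [hd2, PySem.Dict.contains_insert]
      simp [hsub j (List.mem_cons_of_mem _ hj)]
    obtain ⟨ihk, ihg⟩ := ih d2 hnd.of_cons hsub2
    rw [List.foldl_cons]
    refine ⟨by rw [ihk, hkeys2], fun c => ?_⟩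
    rw [ihg c]
    have hknotin : k ∉ ks := (List.nodup_cons.1 hnd).1
    by_cases hc : c ∈ ks
    · have hne : c ≠ k := fun he => hknotin (he ▸ hc)
      rw [if_pos hc, if_pos (List.mem_cons_of_mem _ hc), hd2,
        PySem.Dict.getD_insert_of_ne d _ _ hne]
    · rw [if_neg hc]
      by_cases hck2 : c = k
      · subst hck2
        rw [if_pos List.mem_cons_self, hd2, PySem.Dict.getD_insert_self]
      · rw [if_neg (by simp [hck2, hc]), hd2, PySem.Dict.getD_insert_of_ne d _ _ hck2]

lemma itemsA (trips : List (String × Int × Int)) :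
    (pvSortQA (pvBuildA trips)).items = (pvLanes trips).map (fun k => (k, pvQA trips k)) := by
  have hnd : (pvLanes trips).Nodup := PySem.Set.nodup_ofList _
  have hkeys1 := keys_buildA trips
  have hsub : ∀ k ∈ pvLanes trips, (pvBuildA trips).contains k = true := by
    intro k hk
    rw [PySem.Dict.contains_iff_mem_keys, hkeys1]
    exact hk
  obtain ⟨hk0, hg0⟩ := sortQA_fold (pvLanes trips) (pvBuildA trips) hnd
    hsub
  have hkeys0 : (pvSortQA (pvBuildA trips)).keys = pvLanes trips := by
    rw [pvSortQA, hkeys1] at *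
    rw [hk0]
  rw [PySem.Dict.items_eq_map_keys _ (hkeys0 ▸ hnd) [], hkeys0]
  refine List.map_congr_left ?_
  intro k hk
  have := hg0 k
  rw [pvSortQA, hkeys1] at *
  rw [this, if_pos hk, getD_buildA]
  rfl

-- ---------- Section 3: sorted commutes with a key-preserving projection ----------

lemma insertBy_map {α β : Type} (f : α → β) (bef : α → α → Bool) (bef' : β → β → Bool)
    (h : ∀ a b, bef' (f a) (f b) = bef a b) (x : α) (acc : List α) :
    (PySem.List.insertBy bef x acc).map f = PySem.List.insertBy bef' (f x) (acc.map f) := by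
  induction acc with
  | nil => simp [PySem.List.insertBy]
  | cons y ys ih =>
    simp only [PySem.List.insertBy, List.map_cons, h]
    split <;> simp [List.map_cons, ih]

lemma foldl_insertBy_map {α β : Type} (f : α → β) (bef : α → α → Bool) (bef' : β → β → Bool)
    (h : ∀ a b, bef' (f a) (f b) = bef a b) (xs : List α) (acc : List α) :
    (xs.foldl (fun a x => PySem.List.insertBy bef x a) acc).map f
      = xs.foldl (fun a x => PySem.List.insertBy bef' (f x) a) (acc.map f) := by
  induction xs generalizing acc with
  | nil => rfl
  | cons x xs ih => rw [List.foldl_cons, List.foldl_cons, ih, insertBy_map f bef bef' h]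

lemma sorted_map_proj {α β : Type} (f : α → β) (key : α → Int) (key' : β → Int)
    (h : ∀ x, key' (f x) = key x) (xs : List α) :
    (PySem.List.sorted xs key false).map f = PySem.List.sorted (xs.map f) key' false := by
  rw [PySem.List.sorted_eq_foldl_insertBy, PySem.List.sorted_eq_foldl_insertBy, List.foldl_map]
  exact foldl_insertBy_map f _ _ (fun a b => by simp [h]) xs []

-- ---------- Section 4: stability of sorted ----------

lemma insertBy_pairwise_lex {α : Type} (key sec : α → Int) (x : α) (acc : List α)
    (hp : acc.Pairwise (fun a b => key a < key b ∨ (key a = key b ∧ sec a < sec b)))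
    (hx : ∀ y ∈ acc, sec y < sec x) :
    (PySem.List.insertBy (fun a b => decide (key a < key b)) x acc).Pairwise
      (fun a b => key a < key b ∨ (key a = key b ∧ sec a < sec b)) := by
  induction acc with
  | nil => simp [PySem.List.insertBy]
  | cons y ys ih =>
    simp only [PySem.List.insertBy]
    rcases List.pairwise_cons.1 hp with ⟨hy, hys⟩
    split
    · rename_i hkey
      rw [decide_eq_true_iff] at hkey
      refine List.pairwise_cons.2 ⟨?_, hp⟩
      intro z hz
      rcases List.mem_cons.1 hz with rfl | hz
      · exact Or.inl hkey
      · rcases hy z hz with h1 | ⟨h1, _⟩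
        · exact Or.inl (lt_trans hkey h1)
        · exact Or.inl (h1 ▸ hkey)
    · rename_i hkey
      rw [decide_eq_true_iff] at hkey
      rw [not_lt] at hkey
      refine List.pairwise_cons.2 ⟨?_, ih hys (fun z hz => hx z (List.mem_cons_of_mem _ hz))⟩
      intro z hz
      rcases (PySem.List.mem_insertBy _ x z ys).1 hz with rfl | hz'
      · rcases lt_or_eq_of_le hkey with h1 | h1
        · exact Or.inl h1
        · exact Or.inr ⟨h1, hx y List.mem_cons_self⟩
      · exact hy z hz'

lemma sorted_pairwise_lex {α : Type} (xs : List α) (key sec : α → Int)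
    (h : xs.Pairwise (fun a b => sec a < sec b)) :
    (PySem.List.sorted xs key false).Pairwise
      (fun a b => key a < key b ∨ (key a = key b ∧ sec a < sec b)) := by
  rw [PySem.List.sorted_eq_foldl_insertBy]
  suffices H : ∀ (xs : List α) (acc : List α),
      acc.Pairwise (fun a b => key a < key b ∨ (key a = key b ∧ sec a < sec b)) →
      (∀ y ∈ acc, ∀ x ∈ xs, sec y < sec x) →
      xs.Pairwise (fun a b => sec a < sec b) →
      (xs.foldl (fun a x => PySem.List.insertBy (fun a b => decide (key a < key b)) x a) acc).Pairwise
        (fun a b => key a < key b ∨ (key a = key b ∧ sec a < sec b)) by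
    exact H xs [] (by simp) (by simp) h
  intro xs
  induction xs with
  | nil => intro acc hp _ _; exact hp
  | cons x xs ih =>
    intro acc hp hlt hx
    rw [List.foldl_cons]
    refine ih _ (insertBy_pairwise_lex key sec x acc hp ?_) ?_ hx.tail
    · intro y hy; exact hlt y hy x List.mem_cons_self
    · intro y hy z hz
      rcases (PySem.List.mem_insertBy _ x y acc).1 hy with rfl | hy'
      · exact (List.pairwise_cons.1 hx).1 z hz
      · exact hlt y hy' z (List.mem_cons_of_mem _ hz)

-- ---------- Section 5: the simulation and the merge theorem ----------

def pvStRel (s : Option (Int × Int) × Option String) (t : Option pvR × Option String) : Prop :=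
  s.2 = t.2 ∧ s.1.map (fun v => v.1) = t.1.map (fun r => r.1)

lemma scan_rel {items : List (String × List (Int × Int))} {gs : List (String × List pvR)}
    (hrel : List.Forall₂ pvRel items gs) :
    ∀ {s t}, pvStRel s t →
    pvStRel
      (items.foldl (fun st p =>
        match p.2 with
        | [] => st
        | v :: _ =>
          match st.1 with
          | none => (some v, some p.1)
          | some ev => if v.1 < ev.1 then (some v, some p.1) else st) s)
      (gs.foldl (fun st p =>
        match p.2 with
        | [] => st
        | v :: _ =>
          match st.1 with
          | none => (some v, some p.1)
          | some ev => if v.1 < ev.1 then (some v, some p.1) else st) t) := by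
  induction hrel with
  | nil => intro s t h; exact h
  | cons hpg hrest ih =>
    rename_i p g items' gs'
    intro s t h
    rw [List.foldl_cons, List.foldl_cons]
    apply ih
    obtain ⟨hlane, harr⟩ := hpg
    obtain ⟨h2, h1⟩ := h
    cases hq : p.2 with
    | nil =>
      have : g.2 = [] := by
        rw [hq] at harr; simpa using (List.map_eq_nil_iff.1 harr.symm)
      rw [this]
      exact ⟨h2, h1⟩
    | cons v vs =>
      cases hg : g.2 with
      | nil => rw [hq, hg] at harr; simp at harr
      | cons r rs =>
        rw [hq, hg] at harr
        simp only [List.map_cons, List.cons.injEq] at harr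
        obtain ⟨hv1, _⟩ := harr
        cases hs : s.1 with
        | none =>
          have ht1 : t.1 = none := by
            rw [hs] at h1; simpa using (Option.map_eq_none_iff.mp h1.symm)
          rw [ht1]
          exact ⟨by rw [hlane], by simp [hv1]⟩
        | some ev =>
          cases ht : t.1 with
          | none => rw [hs, ht] at h1; simp at h1
          | some er =>
            rw [hs, ht] at h1
            simp only [Option.map_some, Option.some.injEq] at h1
            simp only [hv1, h1]
            split
            · exact ⟨by rw [hlane], by simp [hv1]⟩
            · exact ⟨h2, by rw [hs, ht]; simp [h1]⟩

lemma forall₂_lanes {items : List (String × List (Int × Int))} {gs : List (String × List pvR)}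
    (hrel : List.Forall₂ pvRel items gs) :
    items.map (fun p => p.1) = gs.map (fun p => p.1) := by
  induction hrel with
  | nil => rfl
  | cons hpg _ ih => simp only [List.map_cons, ih, hpg.1]

lemma forall₂_any {items : List (String × List (Int × Int))} {gs : List (String × List pvR)}
    (hrel : List.Forall₂ pvRel items gs) :
    (items.map (fun p => p.2)).any (fun q => decide (q ≠ []))
      = gs.any (fun p => decide (p.2 ≠ [])) := by
  induction hrel with
  | nil => rfl
  | @cons p g l1 l2 hpg hrest ih =>
    simp only [List.map_cons, List.any_cons, ih]
    congr 1
    have harr := hpg.2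
    rcases hq : p.2 with _ | ⟨v, vs⟩ <;> rcases hg : g.2 with _ | ⟨r, rs⟩ <;>
      rw [hq, hg] at harr <;> simp_all

lemma gScan_mem {l : String} :
    ∀ (gs : List (String × List pvR)) (t : Option pvR × Option String),
    (gs.foldl (fun st p =>
        match p.2 with
        | [] => st
        | v :: _ =>
          match st.1 with
          | none => (some v, some p.1)
          | some ev => if v.1 < ev.1 then (some v, some p.1) else st) t).2 = some l →
    t.2 = some l ∨ l ∈ gs.map (fun p => p.1) := by
  intro gs
  induction gs with
  | nil => intro t h; exact Or.inl h
  | cons g gs ih =>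
    obtain ⟨lane, q⟩ := g
    intro t h
    rw [List.foldl_cons] at h
    rcases ih _ h with h' | h'
    · rcases hq : q with _ | ⟨r, rs⟩ <;> subst hq
      · exact Or.inl h'
      · simp only at h'
        cases ht : t.1 with
        | none =>
          rw [ht] at h'
          simp only [Option.some.injEq] at h'
          exact Or.inr (by simp [← h'])
        | some ev =>
          rw [ht] at h'
          simp only at h'
          by_cases hlt : r.1 < ev.1
          · rw [if_pos hlt] at h'
            simp only [Option.some.injEq] at h'
            exact Or.inr (by simp [← h'])
          · rw [if_neg hlt] at h'
            exact Or.inl h'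
    · exact Or.inr (List.mem_cons_of_mem _ h')

lemma forall₂_map {α β γ δ : Type} {R : α → β → Prop} {S : γ → δ → Prop} (f : α → γ) (g : β → δ)
    (h : ∀ a b, R a b → S (f a) (g b)) :
    ∀ {as : List α} {bs : List β}, List.Forall₂ R as bs → List.Forall₂ S (as.map f) (bs.map g) := by
  intro as bs hab
  induction hab with
  | nil => exact List.Forall₂.nil
  | cons hpg _ ih => exact List.Forall₂.cons (h _ _ hpg) ih

lemma sim (fuel : Nat) (d : PySem.Dict String (List (Int × Int))) (gs : List (String × List pvR))
    (acc : List String) (hnd : d.keys.Nodup) (hrel : List.Forall₂ pvRel d.items gs) :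
    pvExtractA fuel d acc = gExtract fuel gs acc := by
  induction fuel generalizing d gs acc with
  | zero => rfl
  | succ fuel ih =>
    rw [pvExtractA, gExtract]
    have hany : d.values.any (fun q => decide (q ≠ [])) = gs.any (fun p => decide (p.2 ≠ [])) := by
      rw [PySem.Dict.values]
      exact forall₂_any hrel
    rw [hany]
    by_cases hcond : gs.any (fun p => decide (p.2 ≠ [])) = true
    · rw [if_pos hcond, if_pos hcond]
      have hscan : (pvScanA d.items).2 = (gScan gs).2 :=
        (scan_rel hrel (s := (none, none)) (t := (none, none)) ⟨rfl, rfl⟩).1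
      rw [hscan]
      cases hsel : (gScan gs).2 with
      | none => rfl
      | some lane =>
        have hlanemem : lane ∈ gs.map (fun p => p.1) := by
          rcases gScan_mem gs (none, none) hsel with h | h
          · exact absurd h (by simp)
          · exact h
        have hkeysid : d.keys = d.items.map (fun p => p.1) := rfl
        have hmemkeys : lane ∈ d.keys := by
          rw [hkeysid, forall₂_lanes hrel]; exact hlanemem
        have hcont : d.contains lane = true := (PySem.Dict.contains_iff_mem_keys d lane).2 hmemkeys
        have hitems : (d.modify lane [] (fun q => q.drop 1)).items
            = d.items.map (fun p => if p.1 == lane then (p.1, p.2.drop 1) else p) := by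
          rw [PySem.Dict.modify, PySem.Dict.items_insert_of_contains _ _ hcont]
          refine List.map_congr_left ?_
          intro p hp
          by_cases hpl : p.1 == lane
          · rw [if_pos hpl, if_pos hpl]
            have hpl' : p.1 = lane := by simpa using hpl
            have : d.getD lane [] = p.2 := by
              have hpmem : (lane, p.2) ∈ d.items := by rw [← hpl']; exact hp
              exact PySem.Dict.getD_of_mem_items d hpmem hnd []
            rw [this, hpl']
          · rw [if_neg (by simpa using hpl), if_neg (by simpa using hpl)]
        have hnd' : (d.modify lane [] (fun q => q.drop 1)).keys.Nodup := by
          rw [PySem.Dict.modify, PySem.Dict.keys_insert_of_contains _ _ hcont]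
          exact hnd
        have hrel' : List.Forall₂ pvRel (d.modify lane [] (fun q => q.drop 1)).items
            (gs.map (fun p => if p.1 == lane then (p.1, p.2.drop 1) else p)) := by
          rw [hitems]
          refine forall₂_map _ _ ?_ hrel
          intro a b hab
          obtain ⟨h1, h2⟩ := hab
          by_cases hal : (a.1 == lane) = true
          · rw [if_pos hal, if_pos (by rw [← h1]; exact hal)]
            exact ⟨h1, by rw [List.map_drop, List.map_drop, h2]⟩
          · have hbl : ¬ (b.1 == lane) = true := by rw [← h1]; exact hal
            rw [if_neg hal, if_neg hbl]
            exact ⟨h1, h2⟩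
        exact ih _ _ _ hnd' hrel'
    · rw [if_neg hcond, if_neg hcond]

def pvInv (rank : String → Int) (gs : List (String × List pvR)) : Prop :=
  (∀ p ∈ gs, ∀ r ∈ p.2, r.2.2.2 = p.1 ∧ r.2.1 = rank p.1) ∧
  gs.Pairwise (fun p q => rank p.1 < rank q.1) ∧
  (∀ p ∈ gs, p.2.Pairwise (fun a b => pvKeyB a < pvKeyB b)) ∧
  ((pvFlat gs).map pvKeyB).Nodup

def pvHeads (gs : List (String × List pvR)) : List (pvR × String) :=
  gs.filterMap (fun p => match p.2 with | [] => none | r :: _ => some (r, p.1))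

def pvStepH (st : Option pvR × Option String) (h : pvR × String) : Option pvR × Option String :=
  match st.1 with
  | none => (some h.1, some h.2)
  | some ev => if h.1.1 < ev.1 then (some h.1, some h.2) else st

lemma gScan_eq_heads : ∀ (gs : List (String × List pvR)) (t : Option pvR × Option String),
    gs.foldl (fun st p =>
      match p.2 with
      | [] => st
      | v :: _ =>
        match st.1 with
        | none => (some v, some p.1)
        | some ev => if v.1 < ev.1 then (some v, some p.1) else st) t
    = (pvHeads gs).foldl pvStepH t := by
  intro gs
  induction gs with
  | nil => intro t; rfl
  | cons g gs ih =>
    obtain ⟨lane, q⟩ := g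
    intro t
    rw [List.foldl_cons]
    rcases q with _ | ⟨r, rs⟩
    · rw [ih]
      rfl
    · rw [ih]
      rfl

def pvPick (b h : pvR × String) : pvR × String := if h.1.1 < b.1.1 then h else b

lemma foldH_best : ∀ (hs : List (pvR × String)) (b : pvR × String),
    hs.foldl pvStepH (some b.1, some b.2) =
      (some (hs.foldl pvPick b).1, some (hs.foldl pvPick b).2) := by
  intro hs
  induction hs with
  | nil => intro b; rfl
  | cons h hs ih =>
    intro b
    rw [List.foldl_cons, List.foldl_cons]
    by_cases hlt : h.1.1 < b.1.1
    · have h1 : pvStepH (some b.1, some b.2) h = (some h.1, some h.2) := by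
        simp [pvStepH, hlt]
      have h2 : pvPick b h = h := by simp [pvPick, hlt]
      rw [h1, h2, ih]
    · have h1 : pvStepH (some b.1, some b.2) h = (some b.1, some b.2) := by
        simp [pvStepH, hlt]
      have h2 : pvPick b h = b := by simp [pvPick, hlt]
      rw [h1, h2, ih]

lemma best_min : ∀ (hs : List (pvR × String)) (b : pvR × String),
    (∀ h ∈ hs, b.1.2.1 < h.1.2.1) → hs.Pairwise (fun a c => a.1.2.1 < c.1.2.1) →
    (hs.foldl pvPick b ∈ b :: hs) ∧ pvKeyB (hs.foldl pvPick b).1 ≤ pvKeyB b.1 ∧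
      ∀ h ∈ hs, pvKeyB (hs.foldl pvPick b).1 ≤ pvKeyB h.1 := by
  intro hs
  induction hs with
  | nil => intro b _ _; exact ⟨List.mem_cons_self, le_refl _, by simp⟩
  | cons h hs ih =>
    intro b hb hp
    rw [List.foldl_cons]
    have hrank : b.1.2.1 < h.1.2.1 := hb h List.mem_cons_self
    have hb' : ∀ h' ∈ hs, (pvPick b h).1.2.1 < h'.1.2.1 := by
      intro h' hh'
      rw [pvPick]
      split
      · exact (List.pairwise_cons.1 hp).1 h' hh'
      · exact hb h' (List.mem_cons_of_mem _ hh')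
    obtain ⟨hmem, hle, hall⟩ := ih (pvPick b h) hb' (List.pairwise_cons.1 hp).2
    have hpickb : pvKeyB (pvPick b h).1 ≤ pvKeyB b.1 := by
      rw [pvPick]
      split
      · rename_i hlt
        exact le_of_lt ((pvKey_lt_iff _ _).2 (Or.inl hlt))
      · exact le_refl _
    have hpickh : pvKeyB (pvPick b h).1 ≤ pvKeyB h.1 := by
      rw [pvPick]
      split
      · exact le_refl _
      · rename_i hlt
        rw [not_lt] at hlt
        rcases lt_or_eq_of_le hlt with h1 | h1
        · exact le_of_lt ((pvKey_lt_iff _ _).2 (Or.inl h1))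
        · exact le_of_lt ((pvKey_lt_iff _ _).2 (Or.inr ⟨h1, Or.inl hrank⟩))
    refine ⟨?_, le_trans hle hpickb, ?_⟩
    · rcases List.mem_cons.1 hmem with h1 | h1
      · rw [h1, pvPick]
        split
        · exact List.mem_cons_of_mem _ List.mem_cons_self
        · exact List.mem_cons_self
      · exact List.mem_cons_of_mem _ (List.mem_cons_of_mem _ h1)
    · intro h' hh'
      rcases List.mem_cons.1 hh' with h1 | h1
      · rw [h1]; exact le_trans hle hpickh
      · exact hall h' h1

lemma merge (rank : String → Int) (N : Nat) (gs : List (String × List pvR)) (acc : List String)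
    (hinv : pvInv rank gs) (hN : (pvFlat gs).length = N) :
    gExtract N gs acc = acc ++ (PySem.List.sorted (pvFlat gs) pvKeyB false).map (fun r => r.2.2.2) := by
  induction N generalizing gs acc with
  | zero =>
    have hflat : pvFlat gs = [] := List.length_eq_zero_iff.1 hN
    rw [gExtract, hflat]
    simp [PySem.List.sorted]
  | succ N ih =>
    obtain ⟨hi1, hi2, hi3, hi4⟩ := hinv
    have hflatne : pvFlat gs ≠ [] := by
      intro hc; rw [hc] at hN; simp at hN
    -- some queue is nonempty
    have hx : ∃ p ∈ gs, p.2 ≠ [] := by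
      by_contra hc
      push_neg at hc
      apply hflatne
      rw [pvFlat, List.flatMap_eq_nil_iff]
      intro p hp
      simpa using hc p hp
    have hcond : gs.any (fun p => decide (p.2 ≠ [])) = true := by
      rw [List.any_eq_true]
      obtain ⟨p, hp, hne⟩ := hx
      exact ⟨p, hp, by simpa using hne⟩
    -- the heads list is nonempty
    have hheadne : pvHeads gs ≠ [] := by
      obtain ⟨p, hp, hne⟩ := hx
      rcases hq : p.2 with _ | ⟨r, rs⟩
      · exact absurd hq hne
      · intro hc
        have : (r, p.1) ∈ pvHeads gs := by
          rw [pvHeads, List.mem_filterMap]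
          exact ⟨p, hp, by rw [hq]⟩
        rw [hc] at this
        simp at this
    obtain ⟨h0, hs, hheads⟩ := List.exists_cons_of_ne_nil hheadne
    -- heads carry their queue's rank and are ordered by it
    have hheadrank : ∀ h ∈ pvHeads gs, ∃ p ∈ gs, p.2 = h.1 :: p.2.tail ∧ p.1 = h.2 := by
      intro h hh
      rw [pvHeads, List.mem_filterMap] at hh
      obtain ⟨p, hp, hf⟩ := hh
      rcases hq : p.2 with _ | ⟨r, rs⟩
      · rw [hq] at hf; simp at hf
      · rw [hq] at hf
        simp only [Option.some.injEq] at hf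
        exact ⟨p, hp, by rw [hq, ← hf]; exact ⟨rfl, rfl⟩⟩
    have hpairheads : (pvHeads gs).Pairwise (fun a c => a.1.2.1 < c.1.2.1) := by
      rw [pvHeads, List.pairwise_filterMap]
      refine List.Pairwise.imp_of_mem ?_ hi2
      intro p q hp hq hrel b hb b' hb'
      rcases hqp : p.2 with _ | ⟨r, rs⟩
      · rw [hqp] at hb; simp at hb
      · rcases hqq : q.2 with _ | ⟨r', rs'⟩
        · rw [hqq] at hb'; simp at hb'
        · rw [hqp] at hb; rw [hqq] at hb'
          simp only [Option.some.injEq] at hb hb'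
          have e1 := (hi1 p hp r (by rw [hqp]; exact List.mem_cons_self)).2
          have e2 := (hi1 q hq r' (by rw [hqq]; exact List.mem_cons_self)).2
          rw [← hb, ← hb']
          simpa [e1, e2] using hrel
    -- the scan selects the minimal-key head m
    set m := hs.foldl pvPick h0 with hm
    have hscan : gScan gs = (some m.1, some m.2) := by
      rw [gScan, gScan_eq_heads, hheads, List.foldl_cons]
      have : pvStepH (none, none) h0 = (some h0.1, some h0.2) := rfl
      rw [this, foldH_best]
    rw [hheads] at hpairheads
    obtain ⟨hmmem, hmle0, hmall⟩ := best_min hs h0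
      (List.pairwise_cons.1 hpairheads).1 (List.pairwise_cons.1 hpairheads).2
    rw [← hheads] at hmmem
    have hmmin_heads : ∀ h ∈ pvHeads gs, pvKeyB m.1 ≤ pvKeyB h.1 := by
      intro h hh
      rw [hheads] at hh
      rcases List.mem_cons.1 hh with h1 | h1
      · rw [h1]; exact hmle0
      · exact hmall h h1
    -- m.1 is key-minimal over the whole remaining flat list
    have hmmin : ∀ x ∈ pvFlat gs, pvKeyB m.1 ≤ pvKeyB x := by
      intro x hx
      rw [pvFlat, List.mem_flatMap] at hx
      obtain ⟨p, hp, hxq⟩ := hx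
      rcases hq : p.2 with _ | ⟨r, rs⟩
      · rw [hq] at hxq; simp at hxq
      · have hhead : (r, p.1) ∈ pvHeads gs := by
          rw [pvHeads, List.mem_filterMap]
          exact ⟨p, hp, by rw [hq]⟩
        have h1 : pvKeyB m.1 ≤ pvKeyB r := hmmin_heads (r, p.1) hhead
        have hqpair := hi3 p hp
        rw [hq] at hxq hqpair
        rcases List.mem_cons.1 hxq with h2 | h2
        · rw [h2]; exact h1
        · exact le_trans h1 (le_of_lt ((List.pairwise_cons.1 hqpair).1 x h2))
    -- locate m's queue
    obtain ⟨p, hp, hpq, hp1⟩ := hheadrank m hmmem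
    obtain ⟨gsa, gsb, hgs⟩ := List.append_of_mem hp
    -- the other queues' lanes differ from m.2
    have hpair2 := hi2
    rw [hgs] at hpair2
    have hlanesa : ∀ q ∈ gsa, rank q.1 < rank p.1 := by
      intro q hq
      exact (List.pairwise_append.1 hpair2).2.2 q hq p List.mem_cons_self
    have hlanesb : ∀ q ∈ gsb, rank p.1 < rank q.1 := by
      intro q hq
      exact (List.pairwise_cons.1 (List.pairwise_append.1 hpair2).2.1).1 q hq
    have hnea : ∀ q ∈ gsa, (q.1 == m.2) = false := by
      intro q hq
      have := hlanesa q hq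
      rw [← hp1]
      simp only [beq_eq_false_iff_ne, ne_eq]
      intro he; rw [he] at this; exact lt_irrefl _ this
    have hneb : ∀ q ∈ gsb, (q.1 == m.2) = false := by
      intro q hq
      have := hlanesb q hq
      rw [← hp1]
      simp only [beq_eq_false_iff_ne, ne_eq]
      intro he; rw [he] at this; exact lt_irrefl _ this
    -- the popped state
    have hmap : gs.map (fun q => if q.1 == m.2 then (q.1, q.2.drop 1) else q)
        = gsa ++ (p.1, p.2.tail) :: gsb := by
      rw [hgs, List.map_append, List.map_cons]
      congr 1
      · refine (List.map_congr_left ?_).trans (List.map_id gsa)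
        intro q hq
        rw [if_neg (by simp [hnea q hq])]
        rfl
      · congr 1
        · rw [if_pos (by rw [hp1]; exact beq_self_eq_true _), hpq]
          simp
        · refine (List.map_congr_left ?_).trans (List.map_id gsb)
          intro q hq
          rw [if_neg (by simp [hneb q hq])]
          rfl
    set gs' := gsa ++ (p.1, p.2.tail) :: gsb with hgs'
    -- flat decomposition and permutation
    have hflat1 : pvFlat gs = pvFlat gsa ++ (m.1 :: p.2.tail) ++ pvFlat gsb := by
      rw [hgs, pvFlat, List.flatMap_append, List.flatMap_cons, ← hpq]
      simp [pvFlat]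
    have hflat2 : pvFlat gs' = pvFlat gsa ++ p.2.tail ++ pvFlat gsb := by
      rw [hgs', pvFlat, List.flatMap_append, List.flatMap_cons]
      simp [pvFlat]
    have hperm : (pvFlat gs).Perm (m.1 :: pvFlat gs') := by
      rw [hflat1, hflat2]
      have hmid := List.perm_middle (a := m.1) (l₁ := pvFlat gsa) (l₂ := p.2.tail ++ pvFlat gsb)
      simpa using hmid
    -- invariants for the popped state
    have htail_sub : ∀ r ∈ p.2.tail, r ∈ p.2 := by
      intro r hr
      rw [hpq]
      exact List.mem_cons_of_mem _ hr
    have hinv' : pvInv rank gs' := by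
      refine ⟨?_, ?_, ?_, ?_⟩
      · intro q hq r hr
        rw [hgs'] at hq
        rcases List.mem_append.1 hq with h1 | h1
        · exact hi1 q (by rw [hgs]; exact List.mem_append_left _ h1) r hr
        · rcases List.mem_cons.1 h1 with h2 | h2
          · rw [h2] at hr ⊢
            exact hi1 p hp r (htail_sub r hr)
          · exact hi1 q (by rw [hgs]; exact List.mem_append_right _ (List.mem_cons_of_mem _ h2)) r hr
      · rw [hgs']
        rw [List.pairwise_append]
        refine ⟨(List.pairwise_append.1 hpair2).1, ?_, ?_⟩
        · rw [List.pairwise_cons]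
          exact ⟨fun q hq => hlanesb q hq, (List.pairwise_cons.1 (List.pairwise_append.1 hpair2).2.1).2⟩
        · intro a ha b hb
          rcases List.mem_cons.1 hb with h2 | h2
          · rw [h2]
            exact hlanesa a ha
          · exact (List.pairwise_append.1 hpair2).2.2 a ha b (List.mem_cons_of_mem _ h2)
      · intro q hq
        rw [hgs'] at hq
        rcases List.mem_append.1 hq with h1 | h1
        · exact hi3 q (by rw [hgs]; exact List.mem_append_left _ h1)
        · rcases List.mem_cons.1 h1 with h2 | h2
          · rw [h2]
            have := hi3 p hp
            rw [hpq] at this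
            exact (List.pairwise_cons.1 this).2
          · exact hi3 q (by rw [hgs]; exact List.mem_append_right _ (List.mem_cons_of_mem _ h2))
      · have := (hperm.map pvKeyB).nodup_iff.1 hi4
        exact (List.nodup_cons.1 this).2
    have hN' : (pvFlat gs').length = N := by
      have := hperm.length_eq
      rw [this] at hN
      simpa using hN
    -- the sorted list steps by m.1
    have hnodup' : ((pvFlat gs').map pvKeyB).Nodup := hinv'.2.2.2
    have hsortpair : (PySem.List.sorted (pvFlat gs') pvKeyB false).Pairwise
        (fun a b => pvKeyB a < pvKeyB b) := by
      have hle := PySem.List.sorted_pairwise (pvFlat gs') pvKeyB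
      have hnd2 : ((PySem.List.sorted (pvFlat gs') pvKeyB false).map pvKeyB).Nodup :=
        ((PySem.List.sorted_perm (pvFlat gs') pvKeyB false).map pvKeyB).nodup_iff.2 hnodup'
      have hne := List.pairwise_map.mp hnd2
      exact (hle.and hne).imp (fun h => lt_of_le_of_ne h.1 h.2)
    have hsorted : PySem.List.sorted (pvFlat gs) pvKeyB false
        = m.1 :: PySem.List.sorted (pvFlat gs') pvKeyB false := by
      refine PySem.List.sorted_eq_of_perm_of_pairwise_lt _ _ _ ?_ ?_
      · exact ((PySem.List.sorted_perm (pvFlat gs') pvKeyB false).cons m.1).trans hperm.symm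
      · rw [List.pairwise_cons]
        refine ⟨?_, hsortpair⟩
        intro y hy
        have hymem : y ∈ pvFlat gs' := (PySem.List.mem_sorted _ _ _ y).1 hy
        have hyin : y ∈ pvFlat gs := hperm.symm.subset (List.mem_cons_of_mem _ hymem)
        have hle := hmmin y hyin
        have hnd3 := (hperm.map pvKeyB).nodup_iff.1 hi4
        rw [List.map_cons, List.nodup_cons] at hnd3
        have hne : pvKeyB m.1 ≠ pvKeyB y := by
          intro he
          exact hnd3.1 (he ▸ List.mem_map_of_mem hymem)
        exact lt_of_le_of_ne hle hne
    -- m's lane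
    have hmlane : m.1.2.2.2 = m.2 := by
      have := (hi1 p hp m.1 (by rw [hpq]; exact List.mem_cons_self)).1
      rw [this, hp1]
    -- one step of gExtract
    rw [gExtract, if_pos hcond, hscan]
    show gExtract N (gs.map (fun q => if q.1 == m.2 then (q.1, q.2.drop 1) else q)) (acc ++ [m.2])
      = acc ++ (PySem.List.sorted (pvFlat gs) pvKeyB false).map (fun r => r.2.2.2)
    rw [hmap]
    rw [ih gs' (acc ++ [m.2]) hinv' hN']
    rw [hsorted, List.map_cons, hmlane]
    simp

-- ---------- Section 6: assembling ----------

lemma partition_perm (L : List String) (rows : List pvR) (hnd : L.Nodup)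
    (hmem : ∀ r ∈ rows, r.2.2.2 ∈ L) :
    (L.flatMap (fun k => rows.filter (fun r => r.2.2.2 == k))).Perm rows := by
  induction rows with
  | nil => simp
  | cons r rs ih =>
    have hm := hmem r List.mem_cons_self
    obtain ⟨La, Lb, hL⟩ := List.append_of_mem hm
    subst hL
    have hnA : r.2.2.2 ∉ La := by
      intro hc
      exact (List.disjoint_of_nodup_append hnd) hc List.mem_cons_self
    have hA : ∀ k ∈ La, (r :: rs).filter (fun x => x.2.2.2 == k)
        = rs.filter (fun x => x.2.2.2 == k) := by
      intro k hk
      rw [List.filter_cons]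
      have : (r.2.2.2 == k) = false := by
        simp only [beq_eq_false_iff_ne, ne_eq]
        rintro rfl; exact hnA hk
      simp [this]
    have hnB : r.2.2.2 ∉ Lb := by
      have := (List.Nodup.of_append_right hnd)
      exact (List.nodup_cons.1 this).1
    have hB : ∀ k ∈ Lb, (r :: rs).filter (fun x => x.2.2.2 == k)
        = rs.filter (fun x => x.2.2.2 == k) := by
      intro k hk
      rw [List.filter_cons]
      have : (r.2.2.2 == k) = false := by
        simp only [beq_eq_false_iff_ne, ne_eq]
        rintro rfl; exact hnB hk
      simp [this]
    have hself : (r :: rs).filter (fun x => x.2.2.2 == r.2.2.2)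
        = r :: rs.filter (fun x => x.2.2.2 == r.2.2.2) := by
      rw [List.filter_cons]; simp
    rw [List.flatMap_append, List.flatMap_cons, List.flatMap_congr hA, List.flatMap_congr hB,
      hself]
    have hstep : (La.flatMap (fun k => rs.filter (fun x => x.2.2.2 == k)) ++
        (r :: rs.filter (fun x => x.2.2.2 == r.2.2.2) ++
          Lb.flatMap (fun k => rs.filter (fun x => x.2.2.2 == k)))).Perm
        (r :: ((La ++ r.2.2.2 :: Lb).flatMap (fun k => rs.filter (fun x => x.2.2.2 == k)))) := by
      rw [List.flatMap_append, List.flatMap_cons]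
      exact (List.perm_middle (l₁ := La.flatMap (fun k => rs.filter (fun x => x.2.2.2 == k)))
        (l₂ := rs.filter (fun x => x.2.2.2 == r.2.2.2) ++
          Lb.flatMap (fun k => rs.filter (fun x => x.2.2.2 == k))))
    exact hstep.trans ((ih (fun x hx => hmem x (List.mem_cons_of_mem _ hx))).cons r)

lemma canon_rank (trips : List (String × Int × Int)) :
    ∀ r ∈ pvCanon trips, r.2.1 = ((pvLanes trips).idxOf r.2.2.2 : Int) := by
  intro r hr
  rw [pvCanon, List.mem_map] at hr
  obtain ⟨p, _, rfl⟩ := hr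
  rfl

lemma canon_pairwise_idx (trips : List (String × Int × Int)) :
    (pvCanon trips).Pairwise (fun a b => a.2.2.1 < b.2.2.1) := by
  rw [pvCanon]
  rw [List.pairwise_map]
  exact (PySem.List.pairwise_lt_enumerate trips 0).imp (fun h => h)

lemma canon_idx_nodup (trips : List (String × Int × Int)) :
    ((pvCanon trips).map pvKeyB).Nodup := by
  have h1 : ((pvCanon trips).map pvKeyB).map (fun x => (ofLex (ofLex x).2).2)
      = (pvCanon trips).map (fun r => r.2.2.1) := by
    rw [List.map_map]; rfl
  have h2 : (pvCanon trips).map (fun r => r.2.2.1)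
      = (PySem.List.enumerate trips 0).map (fun p => p.1) := by
    rw [pvCanon, List.map_map]; rfl
  have h3 : ((PySem.List.enumerate trips 0).map (fun p => p.1)).Nodup := by
    rw [PySem.List.map_fst_enumerate]
    have : PySem.List.pyRange 0 (0 + (trips.length : Int)) = PySem.List.pyRange 0 (trips.length : Int) := by
      norm_num
    rw [this, PySem.List.pyRange_zero_natCast]
    exact (List.nodup_range).map (fun a b h => by exact_mod_cast h)
  refine List.Nodup.of_map (fun x => (ofLex (ofLex x).2).2) ?_
  rw [h1, h2]
  exact h3

lemma enum_filter_proj (k : String) (trips : List (String × Int × Int)) (s : Int) :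
    ((PySem.List.enumerate trips s).filter (fun p => p.2.1 == k)).map (fun p => p.2.2.2)
      = (trips.filter (fun t => t.1 == k)).map (fun t => t.2.2) := by
  induction trips generalizing s with
  | nil => rfl
  | cons t ts ih =>
    rw [PySem.List.enumerate_cons, List.filter_cons, List.filter_cons]
    by_cases hk : (t.1 == k) = true
    · simp only [hk, if_true, List.map_cons]
      rw [ih]
    · simp only [hk]
      exact ih (s + 1)

lemma qG_arrivals (trips : List (String × Int × Int)) (k : String) :
    (pvQA trips k).map (fun v => v.1) = (pvQG trips k).map (fun r => r.1) := by
  rw [pvQA, pvQG]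
  rw [sorted_map_proj (fun v : Int × Int => v.1) (fun v => v.1) (fun x => x) (fun _ => rfl)]
  rw [sorted_map_proj (fun r : pvR => r.1) (fun r => r.1) (fun x => x) (fun _ => rfl)]
  congr 1
  rw [List.map_map, pvCanon, List.filter_map, List.map_map]
  have : ((PySem.List.enumerate trips 0).filter
      ((fun r : pvR => r.2.2.2 == k) ∘ (fun p : Int × String × Int × Int =>
        (p.2.2.2, ((pvLanes trips).idxOf p.2.1 : Int), p.1, p.2.1)))).map
      ((fun r : pvR => r.1) ∘ (fun p : Int × String × Int × Int =>
        (p.2.2.2, ((pvLanes trips).idxOf p.2.1 : Int), p.1, p.2.1)))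
      = ((PySem.List.enumerate trips 0).filter (fun p => p.2.1 == k)).map (fun p => p.2.2.2) := rfl
  rw [this, enum_filter_proj]
  rfl

lemma forall₂_of_maps {α β γ : Type} (R : β → γ → Prop) (l : List α) (f : α → β) (g : α → γ)
    (h : ∀ a ∈ l, R (f a) (g a)) : List.Forall₂ R (l.map f) (l.map g) := by
  induction l with
  | nil => exact List.Forall₂.nil
  | cons x xs ih =>
    exact List.Forall₂.cons (h x List.mem_cons_self)
      (ih (fun a ha => h a (List.mem_cons_of_mem _ ha)))

lemma nodup_pairwise_idxOf (L : List String) (hnd : L.Nodup) :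
    L.Pairwise (fun a b => (L.idxOf a : Int) < (L.idxOf b : Int)) := by
  rw [List.pairwise_iff_getElem]
  intro i j hi hj hij
  rw [hnd.idxOf_getElem i hi, hnd.idxOf_getElem j hj]
  exact_mod_cast hij

lemma qG_pairwise_key (trips : List (String × Int × Int)) (k : String) :
    (pvQG trips k).Pairwise (fun a b => pvKeyB a < pvKeyB b) := by
  have hsec : ((pvCanon trips).filter (fun r => r.2.2.2 == k)).Pairwise
      (fun a b => a.2.2.1 < b.2.2.1) :=
    (canon_pairwise_idx trips).sublist List.filter_sublist
  have hlex := sorted_pairwise_lex ((pvCanon trips).filter (fun r => r.2.2.2 == k))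
    (fun r => r.1) (fun r => r.2.2.1) hsec
  refine List.Pairwise.imp_of_mem ?_ hlex
  intro a b ha hb hab
  have hamem : a ∈ (pvCanon trips).filter (fun r => r.2.2.2 == k) := by
    rw [← PySem.List.mem_sorted _ (fun r : pvR => r.1) false]; exact ha
  have hbmem : b ∈ (pvCanon trips).filter (fun r => r.2.2.2 == k) := by
    rw [← PySem.List.mem_sorted _ (fun r : pvR => r.1) false]; exact hb
  have ha' := List.mem_filter.1 hamem
  have hb' := List.mem_filter.1 hbmem
  have haL : a.2.2.2 = k := by simpa using ha'.2
  have hbL : b.2.2.2 = k := by simpa using hb'.2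
  have hrank : a.2.1 = b.2.1 := by
    rw [canon_rank trips a ha'.1, canon_rank trips b hb'.1, haL, hbL]
  rw [pvKey_lt_iff]
  rcases hab with h1 | ⟨h1, h2⟩
  · exact Or.inl h1
  · exact Or.inr ⟨h1, Or.inr ⟨hrank, h2⟩⟩

lemma flat_g0_perm (trips : List (String × Int × Int)) :
    (pvFlat (pvG0 trips)).Perm (pvCanon trips) := by
  rw [pvFlat, pvG0]
  have h1 : ((pvLanes trips).map (fun k => (k, pvQG trips k))).flatMap (fun p => p.2)
      = (pvLanes trips).flatMap (fun k => pvQG trips k) := by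
    rw [List.flatMap_map]
  rw [h1]
  have h2 : ((pvLanes trips).flatMap (fun k => pvQG trips k)).Perm
      ((pvLanes trips).flatMap (fun k => (pvCanon trips).filter (fun r => r.2.2.2 == k))) :=
    List.Perm.flatMap_left _ (fun k _ => PySem.List.sorted_perm _ _ _)
  refine h2.trans ?_
  refine partition_perm (pvLanes trips) (pvCanon trips) (PySem.Set.nodup_ofList _) ?_
  intro r hr
  rw [pvCanon, List.mem_map] at hr
  obtain ⟨p, hp, rfl⟩ := hr
  show p.2.1 ∈ pvLanes trips
  rw [pvLanes]
  rw [PySem.Set.mem_ofList]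
  rw [List.mem_map]
  have hp2 : p.2 ∈ trips := by
    have := PySem.List.map_snd_enumerate trips 0
    rw [← this]
    exact List.mem_map_of_mem hp
  exact ⟨p.2, hp2, rfl⟩

theorem main_eq (lanes : List String) (speeds : List Int) (arrival_times : List Int) :
    choose_lanes_dynamic lanes speeds arrival_times
      = choose_lanes_dynamic_alt lanes speeds arrival_times := by
  have htrips : pvTripsA lanes speeds arrival_times = lanes.zip (speeds.zip arrival_times) := rfl
  generalize htr : lanes.zip (speeds.zip arrival_times) = trips
  have hL : (pvLanes trips).Nodup := PySem.Set.nodup_ofList _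
  have hitems := itemsA trips
  have hkeys : (pvSortQA (pvBuildA trips)).keys = pvLanes trips := by
    rw [PySem.Dict.keys, hitems, List.map_map]
    refine (List.map_congr_left ?_).trans (List.map_id _)
    intro k _
    rfl
  have hndk : (pvSortQA (pvBuildA trips)).keys.Nodup := hkeys ▸ hL
  have hrel : List.Forall₂ pvRel (pvSortQA (pvBuildA trips)).items (pvG0 trips) := by
    rw [hitems, pvG0]
    exact forall₂_of_maps pvRel _ _ _ (fun k _ => ⟨rfl, qG_arrivals trips k⟩)
  have htot : (((pvSortQA (pvBuildA trips)).values.map List.length).sum)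
      = (pvFlat (pvG0 trips)).length := by
    rw [PySem.Dict.values, hitems, List.map_map, List.map_map, pvFlat, List.length_flatMap,
      pvG0, List.map_map]
    refine congrArg List.sum (List.map_congr_left ?_)
    intro k _
    have hlen := congrArg List.length (qG_arrivals trips k)
    simpa using hlen
  have hinv : pvInv (fun k => ((pvLanes trips).idxOf k : Int)) (pvG0 trips) := by
    refine ⟨?_, ?_, ?_, ?_⟩
    · intro p hp r hr
      rw [pvG0, List.mem_map] at hp
      obtain ⟨k, _, rfl⟩ := hp
      have hrm : r ∈ (pvCanon trips).filter (fun r => r.2.2.2 == k) := by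
        rw [← PySem.List.mem_sorted _ (fun r : pvR => r.1) false]
        exact hr
      have hr' := List.mem_filter.1 hrm
      have hlane : r.2.2.2 = k := by simpa using hr'.2
      exact ⟨hlane, by rw [canon_rank trips r hr'.1, hlane]⟩
    · rw [pvG0, List.pairwise_map]
      exact nodup_pairwise_idxOf _ hL
    · intro p hp
      rw [pvG0, List.mem_map] at hp
      obtain ⟨k, _, rfl⟩ := hp
      exact qG_pairwise_key trips k
    · exact (((flat_g0_perm trips).map pvKeyB).nodup_iff).2 (canon_idx_nodup trips)
  have hmerge := merge (fun k => ((pvLanes trips).idxOf k : Int))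
    ((((pvSortQA (pvBuildA trips)).values.map List.length).sum)) (pvG0 trips) [] hinv htot.symm
  have hsim := sim ((((pvSortQA (pvBuildA trips)).values.map List.length).sum))
    (pvSortQA (pvBuildA trips)) (pvG0 trips) [] hndk hrel
  have hsorted_eq : PySem.List.sorted (pvFlat (pvG0 trips)) pvKeyB false
      = PySem.List.sorted (pvCanon trips) pvKeyB false := by
    refine PySem.List.sorted_eq_of_perm_of_pairwise_lt _ _ _ ?_ ?_
    · exact (PySem.List.sorted_perm _ _ _).trans (flat_g0_perm trips).symm
    · have hle := PySem.List.sorted_pairwise (pvCanon trips) pvKeyB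
      have hnd2 : ((PySem.List.sorted (pvCanon trips) pvKeyB false).map pvKeyB).Nodup :=
        ((PySem.List.sorted_perm (pvCanon trips) pvKeyB false).map pvKeyB).nodup_iff.2
          (canon_idx_nodup trips)
      have hne := List.pairwise_map.mp hnd2
      exact (hle.and hne).imp (fun h => lt_of_le_of_ne h.1 h.2)
  have hA : choose_lanes_dynamic lanes speeds arrival_times
      = PySem.Str.join " -> "
        (pvExtractA (((pvSortQA (pvBuildA trips)).values.map List.length).sum)
          (pvSortQA (pvBuildA trips)) []) := by
    rw [choose_lanes_dynamic]
    rw [htrips, htr]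
  have hB : choose_lanes_dynamic_alt lanes speeds arrival_times
      = PySem.Str.join " -> "
        ((PySem.List.sorted (pvRowsB trips) pvKeyB false).map (fun r => r.2.2.2)) := by
    rw [choose_lanes_dynamic_alt, htr]
  rw [hA, hB, hsim, hmerge, hsorted_eq, rowsB_eq]
  simp

-- ===== VERDICT (by name: the statement is the Claim_ definition above) =====
theorem choose_lanes_dynamic_spec : Claim_equal_choose_lanes_dynamic := by
  intro lanes speeds arrival_times _
  unfold Spec_choose_lanes_dynamic
  exact main_eq lanes speeds arrival_times
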